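-- pv_equiv track=rewrite | github.com/lorellebrownlee/CFG_Homework_Lorelle_Brownlee | phrase generator.py | generate_phrase
-- ===== SOURCE A (Python) =====
-- def generate_phrase(characters, phrase):
--
--     # #convert strings into lists
--     characters_chars = list(characters)
--     phrase_chars = list(phrase)
--     #create variable to hold the number of items in the phrase that match a value in the list of characters
--     returns_true = 0
--
--     #for each item in phrase, check if in characters
--     #if in characters, remove it from characters and add +1 to value of returns_true
--     #loop to check if the next item is in the new shortened characters string
--     length = len(phrase_chars)
--     for i in range(length):
--
--         if phrase_chars[i] in characters_chars:
--             characters_chars.remove(phrase_chars[i])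
--             returns_true = returns_true + 1
--
--         #if not in characters, return false
--         else:
--             return False
--     #if the number of characters in the phrase with matching characters in the list of
--     #characters is identical to the length of the phrase, return True
--     if returns_true == length:
--         return True
-- ===== SOURCE B (Python) =====
-- def generate_phrase(characters, phrase):
--     # Sort both strings, then check with a single two-pointer merge pass that
--     # the sorted phrase is a sub-multiset of the sorted characters.
--     cs = sorted(characters)
--     ps = sorted(phrase)
--     i = 0
--     n = len(cs)
--     for ch in ps:
--         while i < n and cs[i] < ch:
--             i += 1
--         if i == n or cs[i] != ch:
--             return False
--         i += 1
--     return True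
-- ===== Notes on version B (the rewrite author's own statement) =====
-- stated objective: faster
-- what changed: Replaces the per-character membership scan plus list.remove over a shrinking copy of characters with sort-both-strings-then-one-merge-pass two-pointer sub-multiset check.
import Mathlib
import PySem

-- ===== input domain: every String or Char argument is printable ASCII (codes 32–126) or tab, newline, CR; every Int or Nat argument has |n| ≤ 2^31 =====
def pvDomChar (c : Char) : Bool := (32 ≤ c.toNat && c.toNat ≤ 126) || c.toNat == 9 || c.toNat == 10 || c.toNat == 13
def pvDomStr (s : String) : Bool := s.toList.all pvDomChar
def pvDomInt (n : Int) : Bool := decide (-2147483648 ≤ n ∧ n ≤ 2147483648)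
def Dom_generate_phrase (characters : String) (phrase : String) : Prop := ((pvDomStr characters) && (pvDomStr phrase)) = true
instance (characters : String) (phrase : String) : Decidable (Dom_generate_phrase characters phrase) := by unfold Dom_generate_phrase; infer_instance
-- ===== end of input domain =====

-- ===== PORT A =====
-- B changes the algorithm (sort + one merge pass instead of repeated scan-and-remove); equal return value proved below.
-- Loop of A: for i in range(length): index phrase_chars[i], membership test, list.remove, counter.
-- The 'none' branches below are unreachable (i ∈ range(len), c ∈ cs there); Python's fall-off-None
-- after 'if returns_true == length' is likewise unreachable (returns_true = length always holds there).
def gpLoop (pcs : List Char) : List Int → List Char → Int → Bool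
  | [], _, rt => decide (rt = PySem.List.len pcs)
  | i :: rest, cs, rt =>
    match PySem.List.pyGet? pcs i with
    | none => false
    | some c =>
      if cs.contains c then
        match PySem.List.remove? cs c with
        | none => false
        | some cs' => gpLoop pcs rest cs' (rt + 1)
      else false

def generate_phrase (characters : String) (phrase : String) : Bool :=
  gpLoop phrase.toList (PySem.List.pyRange 0 (PySem.List.len phrase.toList) 1)
    characters.toList 0

-- ===== PORT B =====
-- Two-pointer merge over the two sorted lists: advancing i past smaller characters = dropping heads.
def gpMerge : List Char → List Char → Bool
  | _, [] => true
  | [], _ :: _ => false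
  | c :: cs, p :: ps =>
    if c < p then gpMerge cs (p :: ps)
    else if c = p then gpMerge cs ps
    else false

def generate_phrase_alt (characters : String) (phrase : String) : Bool :=
  gpMerge (PySem.List.sorted characters.toList (fun x => x) false)
          (PySem.List.sorted phrase.toList (fun x => x) false)

-- ===== PRECONDITION & SPEC =====
def Spec_generate_phrase (characters : String) (phrase : String) (out : Bool) : Prop := out = generate_phrase_alt characters phrase
instance (characters : String) (phrase : String) (out : Bool) : Decidable (Spec_generate_phrase characters phrase out) := by unfold Spec_generate_phrase; infer_instance

-- ===== CLAIM (what is proved, stated in full; the proofs are below) =====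
def Claim_equal_generate_phrase : Prop := ∀ (characters : String) (phrase : String), Dom_generate_phrase characters phrase → Spec_generate_phrase characters phrase (generate_phrase characters phrase)

-- ===== LEMMAS AND PROOFS =====

theorem cons_subperm_iff_erase (a : Char) (l1 l2 : List Char) :
    List.Subperm (a :: l1) l2 ↔ a ∈ l2 ∧ List.Subperm l1 (l2.erase a) := by
  constructor
  · intro h
    have ha : a ∈ l2 := h.subset (List.mem_cons_self ..)
    have hp : l2.Perm (a :: l2.erase a) := List.perm_cons_erase ha
    exact ⟨ha, (List.subperm_cons a).mp (hp.subperm_left.mp h)⟩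
  · rintro ⟨ha, h⟩
    exact (List.perm_cons_erase ha).subperm_left.mpr ((List.subperm_cons a).mpr h)

theorem gpLoop_eq (pcs : List Char) :
    ∀ (k i : Nat) (cs : List Char), i + k = pcs.length →
      (gpLoop pcs (PySem.List.pyRange (i : Int) (PySem.List.len pcs) 1) cs (i : Int) = true
        ↔ List.Subperm (pcs.drop i) cs) := by
  intro k
  induction k with
  | zero =>
    intro i cs hik
    have hi : i = pcs.length := by omega
    subst hi
    rw [PySem.List.pyRange_one_eq_nil (by simp [PySem.List.len_eq])]
    simp [gpLoop, List.nil_subperm, PySem.List.len_eq, List.drop_length]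
  | succ k ih =>
    intro i cs hik
    have hi : i < pcs.length := by omega
    have hcons : PySem.List.pyRange (i : Int) (PySem.List.len pcs) 1
        = (i : Int) :: PySem.List.pyRange ((i : Int) + 1) (PySem.List.len pcs) 1 := by
      apply PySem.List.pyRange_one_cons
      simp [PySem.List.len_eq]; omega
    have hcast : ((i : Int) + 1) = ((i + 1 : Nat) : Int) := by push_cast; ring
    rw [hcons, hcast]
    have hget : PySem.List.pyGet? pcs ((i : Nat) : Int) = some pcs[i] := by
      simp [PySem.List.pyGet?_natCast, List.getElem?_eq_getElem hi]
    have hdrop : pcs.drop i = pcs[i] :: pcs.drop (i + 1) := List.drop_eq_getElem_cons hi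
    by_cases hmem : pcs[i] ∈ cs
    · have hrem : PySem.List.remove? cs pcs[i] = some (cs.erase pcs[i]) :=
        PySem.List.remove?_eq_some_erase _ _ hmem
      simp only [gpLoop, hget, List.contains_iff_mem.mpr hmem, if_pos, hrem]
      rw [hcast, ih (i + 1) (cs.erase pcs[i]) (by omega), hdrop,
        cons_subperm_iff_erase]
      simp [hmem]
    · simp [gpLoop, hget, hmem]
      intro h
      exact hmem (h.subset (by rw [hdrop]; exact List.mem_cons_self ..))

theorem gpMerge_eq :
    ∀ (cs ps : List Char), cs.Pairwise (· ≤ ·) → ps.Pairwise (· ≤ ·) →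
      (gpMerge cs ps = true ↔ List.Subperm ps cs) := by
  intro cs
  induction cs with
  | nil =>
    intro ps _ _
    cases ps with
    | nil => simp [gpMerge]
    | cons p ps => simp [gpMerge, List.subperm_nil]
  | cons c cs ih =>
    intro ps hcs hps
    cases ps with
    | nil => simp [gpMerge, List.nil_subperm]
    | cons p ps =>
      have hcs' := (List.pairwise_cons.mp hcs).2
      have hps' := (List.pairwise_cons.mp hps).2
      by_cases hlt : c < p
      · -- c is smaller than every element of p :: ps, so it can never be matched
        have hred : gpMerge (c :: cs) (p :: ps) = gpMerge cs (p :: ps) := by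
          simp [gpMerge, hlt]
        have hnotmem : c ∉ (p :: ps) := by
          intro hmem
          rcases List.mem_cons.mp hmem with h1 | h1
          · exact absurd h1 (ne_of_lt hlt)
          · exact absurd ((List.pairwise_cons.mp hps).1 c h1) (not_le.mpr hlt)
        rw [hred, ih (p :: ps) hcs' hps]
        constructor
        · intro h
          exact h.trans List.subperm_cons_self
        · intro h
          rw [List.subperm_ext_iff] at h ⊢
          intro x hx
          have hcount := h x hx
          have hxc : x ≠ c := fun he => hnotmem (he ▸ hx)
          rwa [List.count_cons_of_ne (Ne.symm hxc)] at hcount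
      · by_cases heq : c = p
        · subst heq
          have hred : gpMerge (c :: cs) (c :: ps) = gpMerge cs ps := by
            simp [gpMerge]
          rw [hred, ih ps hcs' hps', List.subperm_cons]
        · -- p < c ≤ every element of c :: cs, so p is missing and subperm fails
          have hpc : p < c := lt_of_le_of_ne (not_lt.mp hlt) (fun h => heq h.symm)
          have hred : gpMerge (c :: cs) (p :: ps) = false := by
            simp [gpMerge, hlt, heq]
          rw [hred]
          simp only [Bool.false_eq_true, false_iff]
          intro h
          have hmem : p ∈ c :: cs := h.subset (List.mem_cons_self ..)
          rcases List.mem_cons.mp hmem with h1 | h1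
          · exact heq h1.symm
          · exact absurd ((List.pairwise_cons.mp hcs).1 p h1) (not_le.mpr hpc)

theorem generate_phrase_iff (characters phrase : String) :
    generate_phrase characters phrase = true
      ↔ List.Subperm phrase.toList characters.toList := by
  unfold generate_phrase
  have := gpLoop_eq phrase.toList phrase.toList.length 0 characters.toList (by omega)
  simpa using this

theorem generate_phrase_alt_iff (characters phrase : String) :
    generate_phrase_alt characters phrase = true
      ↔ List.Subperm phrase.toList characters.toList := by
  unfold generate_phrase_alt
  rw [gpMerge_eq _ _ (PySem.List.sorted_pairwise ..) (PySem.List.sorted_pairwise ..),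
    (PySem.List.sorted_perm phrase.toList (fun x => x) false).subperm_right,
    (PySem.List.sorted_perm characters.toList (fun x => x) false).subperm_left]

-- ===== VERDICT (by name: the statement is the Claim_ definition above) =====
theorem generate_phrase_spec : Claim_equal_generate_phrase := by
  intro characters phrase _
  unfold Spec_generate_phrase
  have h := (generate_phrase_iff characters phrase).trans
    (generate_phrase_alt_iff characters phrase).symm
  cases ha : generate_phrase characters phrase <;> cases hb : generate_phrase_alt characters phrase <;> simp_all
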